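-- pv_equiv track=rewrite | github.com/dragonkid/dotfiles | openclaw/workspace/scripts/vault_index.py | merge_short_chunks
-- ===== SOURCE A (Python) =====
-- MIN_CHUNK_SIZE = 300  # 小于此值的 chunk 合并到相邻 chunk
--
-- def merge_short_chunks(chunks: list[dict], min_size: int = MIN_CHUNK_SIZE) -> list[dict]:
--     """合并过短的相邻 chunk（同一 heading 下）"""
--     if not chunks:
--         return chunks
--     merged = []
--     buf = chunks[0].copy()
--     for chunk in chunks[1:]:
--         # 同文件同 heading 且 buf 太短，合并
--         if (buf["file"] == chunk["file"]
--                 and buf["heading"] == chunk["heading"]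
--                 and len(buf["content"]) < min_size):
--             buf["content"] = buf["content"] + "\n\n" + chunk["content"]
--         else:
--             if len(buf["content"]) >= min_size or not merged:
--                 merged.append(buf)
--             else:
--                 # buf 仍然太短，合并到上一个
--                 merged[-1]["content"] += "\n\n" + buf["content"]
--             buf = chunk.copy()
--     # 处理最后一个
--     if len(buf["content"]) >= min_size or not merged:
--         merged.append(buf)
--     else:
--         merged[-1]["content"] += "\n\n" + buf["content"]
--     return merged
-- ===== SOURCE B (Python) =====
-- MIN_CHUNK_SIZE = 300
--
--
-- def merge_short_chunks(chunks: list[dict], min_size: int = MIN_CHUNK_SIZE) -> list[dict]: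
--     """Two-phase rewrite: (1) collapse each maximal same-file/same-heading short
--     run into one chunk, (2) fold still-short runs into their predecessor."""
--     # Phase 1: build runs.
--     runs = []
--     for chunk in chunks:
--         if (runs
--                 and runs[-1]["file"] == chunk["file"]
--                 and runs[-1]["heading"] == chunk["heading"]
--                 and len(runs[-1]["content"]) < min_size):
--             runs[-1]["content"] += "\n\n" + chunk["content"]
--         else:
--             runs.append(chunk.copy())
--     # Phase 2: attach runs that are still too short to the previous result entry.
--     result = []
--     for run in runs:
--         if len(run["content"]) >= min_size or not result:
--             result.append(run)
--         else:
--             result[-1]["content"] += "\n\n" + run["content"]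
--     return result
-- ===== Notes on version B (the rewrite author's own statement) =====
-- stated objective: alternative
-- what changed: A interleaves absorption and flushing in one loop over a (merged, buf) state pair; B decomposes the task into two independent passes: phase 1 collapses each maximal same-file/same-heading short run in place at the tail of a run list, phase 2 folds still-short runs into their predecessor.
import Mathlib
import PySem

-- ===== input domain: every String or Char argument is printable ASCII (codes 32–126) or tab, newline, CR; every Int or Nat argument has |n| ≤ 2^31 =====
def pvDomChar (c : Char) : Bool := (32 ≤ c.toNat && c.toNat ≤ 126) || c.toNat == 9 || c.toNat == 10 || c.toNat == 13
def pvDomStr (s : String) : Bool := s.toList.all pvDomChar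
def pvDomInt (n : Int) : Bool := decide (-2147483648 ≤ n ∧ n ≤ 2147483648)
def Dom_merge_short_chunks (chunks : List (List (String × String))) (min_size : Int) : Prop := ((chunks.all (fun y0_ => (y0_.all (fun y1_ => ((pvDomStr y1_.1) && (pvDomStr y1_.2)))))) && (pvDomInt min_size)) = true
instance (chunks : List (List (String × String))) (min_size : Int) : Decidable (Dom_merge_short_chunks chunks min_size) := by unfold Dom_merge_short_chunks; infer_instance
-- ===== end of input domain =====

-- B replaces A's interleaved (merged, buf) loop by two independent passes (collapse runs, then
-- attach still-short runs to their predecessor); same cost, different decomposition ("alternative").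


-- shared dict primitives (Python d[k] read / d[k] = v on the association-list encoding)
def pvGetS (d : List (String × String)) (k : String) : String := (PySem.Dict.mk d).getD k ""
def pvSetC (d : List (String × String)) (v : String) : List (String × String) := ((PySem.Dict.mk d).insert "content" v).items
def pvLenC (d : List (String × String)) : Int := PySem.Str.len (pvGetS d "content")

-- ===== PORT A =====
-- merged[-1]["content"] += "\n\n" + s  (mutate the last dict of merged; [] unreachable: guarded by 'or not merged')
def pvUpdLastA : List (List (String × String)) → String → List (List (String × String))
  | [], _ => []
  | [d], s => [pvSetC d (pvGetS d "content" ++ "\n\n" ++ s)]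
  | d :: e :: rest, s => d :: pvUpdLastA (e :: rest) s

-- the flush code A runs in its else-branch and once after the loop
def pvFlushA (min_size : Int) (merged : List (List (String × String))) (buf : List (String × String)) : List (List (String × String)) :=
  if pvLenC buf ≥ min_size ∨ merged = [] then merged ++ [buf]
  else pvUpdLastA merged (pvGetS buf "content")

-- A's 'for chunk in chunks[1:]' loop over the state (merged, buf)
def pvLoopA (min_size : Int) (merged : List (List (String × String))) (buf : List (String × String)) : List (List (String × String)) → List (List (String × String))
  | [] => pvFlushA min_size merged buf
  | chunk :: rest =>
    if pvGetS buf "file" = pvGetS chunk "file" ∧ pvGetS buf "heading" = pvGetS chunk "heading" ∧ pvLenC buf < min_size then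
      pvLoopA min_size merged (pvSetC buf (pvGetS buf "content" ++ "\n\n" ++ pvGetS chunk "content")) rest
    else
      pvLoopA min_size (pvFlushA min_size merged buf) chunk rest

def merge_short_chunks (chunks : List (List (String × String))) (min_size : Int) : List (List (String × String)) :=
  match chunks with
  | [] => chunks
  | c0 :: rest => pvLoopA min_size [] c0 rest

-- ===== PORT B =====
-- phase-1 step: absorb the chunk into runs[-1] when same file/heading and runs[-1] is still short, else append a copy
def pvStepB (min_size : Int) (runs : List (List (String × String))) (chunk : List (String × String)) : List (List (String × String)) :=
  match runs.getLast? with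
  | some r =>
    if pvGetS r "file" = pvGetS chunk "file" ∧ pvGetS r "heading" = pvGetS chunk "heading" ∧ pvLenC r < min_size then
      runs.dropLast ++ [pvSetC r (pvGetS r "content" ++ "\n\n" ++ pvGetS chunk "content")]
    else runs ++ [chunk]
  | none => runs ++ [chunk]

-- phase-2 step: keep the run, or attach it to result[-1] when it is still short
def pvFlushB (min_size : Int) (result : List (List (String × String))) (run : List (String × String)) : List (List (String × String)) :=
  if pvLenC run ≥ min_size ∨ result = [] then result ++ [run]
  else
    match result.getLast? with
    | some r => result.dropLast ++ [pvSetC r (pvGetS r "content" ++ "\n\n" ++ pvGetS run "content")]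
    | none => result ++ [run]   -- unreachable: the branch requires result ≠ []

def merge_short_chunks_alt (chunks : List (List (String × String))) (min_size : Int) : List (List (String × String)) :=
  (chunks.foldl (pvStepB min_size) []).foldl (pvFlushB min_size) []

-- ===== PRECONDITION & SPEC =====
-- Pre_ excludes exactly the chunk lists on which A raises KeyError: a chunk without "content",
-- a chunk without "file" when there are at least two chunks, or an adjacent pair with equal
-- "file" values in which a side lacks "heading" (short-circuit: heading is only read then).
def Pre_merge_short_chunks (chunks : List (List (String × String))) (min_size : Int) : Prop :=
  (∀ c ∈ chunks, "content" ∈ c.map Prod.fst) ∧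
  (2 ≤ chunks.length → ∀ c ∈ chunks, "file" ∈ c.map Prod.fst) ∧
  (∀ p ∈ chunks.zip chunks.tail, pvGetS p.1 "file" = pvGetS p.2 "file" →
    "heading" ∈ p.1.map Prod.fst ∧ "heading" ∈ p.2.map Prod.fst)
instance (chunks : List (List (String × String))) (min_size : Int) : Decidable (Pre_merge_short_chunks chunks min_size) := by unfold Pre_merge_short_chunks; infer_instance

def pvWitness_merge_short_chunks : (List (List (String × String))) × Int :=
  ([[("file", "a"), ("heading", "h"), ("content", "hi")], [("file", "a"), ("heading", "h"), ("content", "yo")]], 10)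

def Spec_merge_short_chunks (chunks : List (List (String × String))) (min_size : Int) (out : List (List (String × String))) : Prop := out = merge_short_chunks_alt chunks min_size
instance (chunks : List (List (String × String))) (min_size : Int) (out : List (List (String × String))) : Decidable (Spec_merge_short_chunks chunks min_size out) := by unfold Spec_merge_short_chunks; infer_instance

-- ===== CLAIM (what is proved, stated in full; the proofs are below) =====
def Claim_equal_merge_short_chunks : Prop := ∀ (chunks : List (List (String × String))) (min_size : Int), Dom_merge_short_chunks chunks min_size → Pre_merge_short_chunks chunks min_size → Spec_merge_short_chunks chunks min_size (merge_short_chunks chunks min_size)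

-- ===== LEMMAS AND PROOFS =====

-- the list of maximal runs starting from current run-buffer `buf` (proof-side characterisation)
def pvRuns (min_size : Int) (buf : List (String × String)) : List (List (String × String)) → List (List (String × String))
  | [] => [buf]
  | chunk :: rest =>
    if pvGetS buf "file" = pvGetS chunk "file" ∧ pvGetS buf "heading" = pvGetS chunk "heading" ∧ pvLenC buf < min_size then
      pvRuns min_size (pvSetC buf (pvGetS buf "content" ++ "\n\n" ++ pvGetS chunk "content")) rest
    else buf :: pvRuns min_size chunk rest

theorem pvUpdLastA_eq (res : List (List (String × String))) (hr : res ≠ []) (s : String) :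
    pvUpdLastA res s = res.dropLast ++ [pvSetC (res.getLast hr) (pvGetS (res.getLast hr) "content" ++ "\n\n" ++ s)] := by
  induction res with
  | nil => exact absurd rfl hr
  | cons d tl ih =>
    cases tl with
    | nil => simp [pvUpdLastA]
    | cons e tl' => simp [pvUpdLastA, ih (by simp)]

theorem pvFlushA_eq_pvFlushB (min_size : Int) (res : List (List (String × String))) (buf : List (String × String)) :
    pvFlushA min_size res buf = pvFlushB min_size res buf := by
  unfold pvFlushA pvFlushB
  split_ifs with h
  · rfl
  · have hr : res ≠ [] := by intro h0; exact h (Or.inr h0)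
    rw [pvUpdLastA_eq res hr, List.getLast?_eq_some_getLast hr]

theorem pvLoopA_eq_foldl (min_size : Int) (rest : List (List (String × String))) :
    ∀ (merged buf), pvLoopA min_size merged buf rest = (pvRuns min_size buf rest).foldl (pvFlushB min_size) merged := by
  induction rest with
  | nil => intro merged buf; simp [pvLoopA, pvRuns, pvFlushA_eq_pvFlushB]
  | cons chunk rest ih =>
    intro merged buf
    unfold pvLoopA pvRuns
    split_ifs with h
    · exact ih merged _
    · simp [List.foldl_cons, ih (pvFlushB min_size merged buf) chunk, pvFlushA_eq_pvFlushB]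

theorem pvFoldStepB_eq (min_size : Int) (rest : List (List (String × String))) :
    ∀ (acc buf), rest.foldl (pvStepB min_size) (acc ++ [buf]) = acc ++ pvRuns min_size buf rest := by
  induction rest with
  | nil => intro acc buf; simp [pvRuns]
  | cons chunk rest ih =>
    intro acc buf
    rw [List.foldl_cons]
    unfold pvStepB pvRuns
    rw [List.getLast?_concat]
    simp only [List.dropLast_concat]
    split_ifs with h
    · exact ih acc _
    · rw [List.append_assoc] at *
      simpa using ih (acc ++ [buf]) chunk

-- ===== VERDICT (by name: the statement is the Claim_ definition above) =====
theorem merge_short_chunks_spec : Claim_equal_merge_short_chunks := by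
  intro chunks min_size _dom _pre
  unfold Spec_merge_short_chunks
  cases chunks with
  | nil => rfl
  | cons c0 rest =>
    show pvLoopA min_size [] c0 rest = _
    unfold merge_short_chunks_alt
    rw [List.foldl_cons]
    have h0 : pvStepB min_size [] c0 = [] ++ [c0] := by simp [pvStepB]
    rw [h0, pvFoldStepB_eq, List.nil_append, pvLoopA_eq_foldl]
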